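-- pv_equiv track=rewrite | github.com/peterqliu/fathom | pdf_utils.py | combine_short_sentences_with_subindices
-- ===== SOURCE A (Python) =====
-- def combine_short_sentences_with_subindices(sentences_with_subindices, min_length=20):
--     """
--     Combines short sentences while preserving the original sub-index of the first sentence in a combination.
--
--     Args:
--         sentences_with_subindices (list): A list of (sentence_text, original_sub_index) tuples.
--         min_length (int): The minimum length for a sentence to not be combined.
--
--     Returns:
--         list: A list of (combined_sentence_text, original_sub_index_of_first_part) tuples.
--     """
--     if not sentences_with_subindices:
--         return []
--
--     result = []
--     i = 0
--     while i < len(sentences_with_subindices):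
--         current_text, first_sub_idx_in_group = sentences_with_subindices[i]
--
--         # Pointer for combining subsequent sentences
--         next_item_idx = i + 1
--         # Keep combining with next sentences until we reach minimum length or run out of sentences
--         while len(current_text) < min_length and next_item_idx < len(sentences_with_subindices):
--             next_text, _ = sentences_with_subindices[next_item_idx]
--             current_text += " " + next_text
--             next_item_idx += 1
--
--         result.append((current_text, first_sub_idx_in_group))
--         i = next_item_idx # Move main iterator to the start of the next unprocessed sentence
--
--     return result
-- ===== SOURCE B (Python) =====
-- def combine_short_sentences_with_subindices(sentences_with_subindices, min_length=20):
--     result = []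
--     current_text = None
--     first_idx = None
--     for text, idx in sentences_with_subindices:
--         if current_text is None:
--             current_text, first_idx = text, idx
--         elif len(current_text) < min_length:
--             current_text += " " + text
--         else:
--             result.append((current_text, first_idx))
--             current_text, first_idx = text, idx
--     if current_text is not None:
--         result.append((current_text, first_idx))
--     return result
-- ===== Notes on version B (the rewrite author's own statement) =====
-- stated objective: simpler
-- what changed: Replaced the nested while-loops with explicit index jumping by a single flat fold over the items that keeps an optional (current_text, first_idx) accumulator and flushes it when it is long enough (and once at the end).
import Mathlib
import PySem

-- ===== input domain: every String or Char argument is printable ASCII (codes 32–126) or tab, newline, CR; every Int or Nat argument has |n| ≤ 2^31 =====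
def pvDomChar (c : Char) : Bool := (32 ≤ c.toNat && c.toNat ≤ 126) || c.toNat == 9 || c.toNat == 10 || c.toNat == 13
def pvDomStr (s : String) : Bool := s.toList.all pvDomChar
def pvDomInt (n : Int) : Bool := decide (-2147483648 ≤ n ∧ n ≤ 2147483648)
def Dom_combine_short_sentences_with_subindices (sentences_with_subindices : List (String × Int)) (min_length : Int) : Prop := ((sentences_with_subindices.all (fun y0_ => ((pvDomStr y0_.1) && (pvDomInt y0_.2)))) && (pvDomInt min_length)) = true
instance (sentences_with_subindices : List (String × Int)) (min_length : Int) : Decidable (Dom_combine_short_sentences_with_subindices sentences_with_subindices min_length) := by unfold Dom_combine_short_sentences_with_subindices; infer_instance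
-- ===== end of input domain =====

-- B replaces A's nested while-loops with index jumping by one flat fold with an optional accumulator; objective: simpler.


-- ===== PORT A =====
-- inner while-loop: keep appending " " + next while len(current_text) < min_length and items remain;
-- returns (current_text, remaining items = where the outer index jumps to)
def pvInnerA (min_length : Int) (cur : String) : List (String × Int) → String × List (String × Int)
  | [] => (cur, [])
  | (t, i) :: rs =>
    if (cur.length : Int) < min_length then pvInnerA min_length (cur ++ " " ++ t) rs
    else (cur, (t, i) :: rs)

theorem pvInnerA_len_le (min_length : Int) (cur : String) (l : List (String × Int)) :
    (pvInnerA min_length cur l).2.length ≤ l.length := by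
  induction l generalizing cur with
  | nil => simp [pvInnerA]
  | cons p rs ih =>
    obtain ⟨t, i⟩ := p
    simp only [pvInnerA]
    split
    · exact le_trans (ih _) (Nat.le_succ _)
    · simp

-- outer while-loop over the remaining suffix of the list
def combine_short_sentences_with_subindices (sentences_with_subindices : List (String × Int)) (min_length : Int) : List (String × Int) :=
  match sentences_with_subindices with
  | [] => []
  | (t, i) :: rs =>
    let p := pvInnerA min_length t rs
    (p.1, i) :: combine_short_sentences_with_subindices p.2 min_length
termination_by sentences_with_subindices.length
decreasing_by
  have := pvInnerA_len_le min_length t rs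
  simp at *; omega

-- ===== PORT B =====
-- one fold step: start a group, grow the short accumulator, or flush it and restart
def pvStepB (min_length : Int) (st : List (String × Int) × Option (String × Int)) (x : String × Int) : List (String × Int) × Option (String × Int) :=
  match st.2 with
  | none => (st.1, some (x.1, x.2))
  | some (c, fi) =>
    if (c.length : Int) < min_length then (st.1, some (c ++ " " ++ x.1, fi))
    else (st.1 ++ [(c, fi)], some (x.1, x.2))

def combine_short_sentences_with_subindices_alt (sentences_with_subindices : List (String × Int)) (min_length : Int) : List (String × Int) :=
  let st := sentences_with_subindices.foldl (pvStepB min_length) ([], none)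
  match st.2 with
  | none => st.1
  | some p => st.1 ++ [p]

-- ===== PRECONDITION & SPEC =====
def Spec_combine_short_sentences_with_subindices (sentences_with_subindices : List (String × Int)) (min_length : Int) (out : List (String × Int)) : Prop := out = combine_short_sentences_with_subindices_alt sentences_with_subindices min_length
instance (sentences_with_subindices : List (String × Int)) (min_length : Int) (out : List (String × Int)) : Decidable (Spec_combine_short_sentences_with_subindices sentences_with_subindices min_length out) := by unfold Spec_combine_short_sentences_with_subindices; infer_instance

-- ===== CLAIM (what is proved, stated in full; the proofs are below) =====
def Claim_equal_combine_short_sentences_with_subindices : Prop := ∀ (sentences_with_subindices : List (String × Int)) (min_length : Int), Dom_combine_short_sentences_with_subindices sentences_with_subindices min_length → Spec_combine_short_sentences_with_subindices sentences_with_subindices min_length (combine_short_sentences_with_subindices sentences_with_subindices min_length)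

-- ===== LEMMAS AND PROOFS =====

-- B's finalizer, abstracted for the invariant
def pvFinB (st : List (String × Int) × Option (String × Int)) : List (String × Int) :=
  match st.2 with
  | none => st.1
  | some p => st.1 ++ [p]

-- loop invariant: running A's outer loop from an open group (cur, fi) over rest
-- equals B's fold continued from state (acc, some (cur, fi))
theorem pvInvariant (min_length : Int) (rest : List (String × Int)) :
    ∀ (cur : String) (fi : Int) (acc : List (String × Int)),
    acc ++ ((pvInnerA min_length cur rest).1, fi) ::
        combine_short_sentences_with_subindices (pvInnerA min_length cur rest).2 min_length
      = pvFinB (rest.foldl (pvStepB min_length) (acc, some (cur, fi))) := by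
  induction rest with
  | nil => intro cur fi acc; simp [pvInnerA, combine_short_sentences_with_subindices, pvFinB]
  | cons x rs ih =>
    intro cur fi acc
    obtain ⟨t, i⟩ := x
    by_cases h : (cur.length : Int) < min_length
    · simp only [pvInnerA, h, if_pos, List.foldl_cons, pvStepB]
      exact ih (cur ++ " " ++ t) fi acc
    · simp only [pvInnerA, h, if_neg, not_false_iff, List.foldl_cons, pvStepB]
      have := ih t i (acc ++ [(cur, fi)])
      rw [combine_short_sentences_with_subindices]
      simpa using this

-- ===== VERDICT (by name: the statement is the Claim_ definition above) =====
theorem combine_short_sentences_with_subindices_spec : Claim_equal_combine_short_sentences_with_subindices := by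
  intro l min_length _
  unfold Spec_combine_short_sentences_with_subindices combine_short_sentences_with_subindices_alt
  match l with
  | [] => simp [combine_short_sentences_with_subindices]
  | (t, i) :: rs =>
    rw [combine_short_sentences_with_subindices]
    have := pvInvariant min_length rs t i []
    simpa [pvFinB, pvStepB] using this
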